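-- pv_equiv track=rewrite | github.com/akashnag/ash | src/ash/utils/utils.py | get_horizontal_cursor_position
-- ===== SOURCE A (Python) =====
-- def get_horizontal_cursor_position(text, curpos, tab_size):
-- 	ptext = text[0:curpos]
-- 	x = 0
-- 	for c in ptext:
-- 		if(c == "\t"):
-- 			x += (tab_size - (x % tab_size))
-- 		else:
-- 			x += 1
-- 	return x
-- ===== SOURCE B (Python) =====
-- def get_horizontal_cursor_position(text, curpos, tab_size):
-- 	parts = text[0:curpos].split("\t")
-- 	x = len(parts[0])
-- 	for part in parts[1:]:
-- 		x += tab_size - (x % tab_size)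
-- 		x += len(part)
-- 	return x
-- ===== Notes on version B (the rewrite author's own statement) =====
-- stated objective: faster
-- what changed: B splits the prefix on tabs once and folds over the tab-delimited segments (snap to next tab stop, then add the segment length) instead of scanning character by character with a per-character branch; the interpreter loop runs per segment, not per character.
import Mathlib
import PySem

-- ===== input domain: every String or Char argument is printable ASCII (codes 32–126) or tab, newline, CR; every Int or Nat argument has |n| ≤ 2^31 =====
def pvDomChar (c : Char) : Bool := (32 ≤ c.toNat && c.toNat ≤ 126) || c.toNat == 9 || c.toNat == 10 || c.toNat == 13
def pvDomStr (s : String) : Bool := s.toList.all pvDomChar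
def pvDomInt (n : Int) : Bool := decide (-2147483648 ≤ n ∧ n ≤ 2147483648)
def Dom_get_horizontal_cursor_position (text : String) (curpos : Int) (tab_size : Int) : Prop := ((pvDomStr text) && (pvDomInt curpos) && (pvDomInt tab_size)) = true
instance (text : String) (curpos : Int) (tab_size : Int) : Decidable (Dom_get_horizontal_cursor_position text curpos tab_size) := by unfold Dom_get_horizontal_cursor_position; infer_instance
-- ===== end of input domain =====

-- B replaces A's per-character scan by a split-on-tab fold over segments; same O(n), measured constant-factor faster in a timing run (one C-level split, fewer interpreted iterations).
-- Pre_ excludes exactly the inputs where the Python A raises ZeroDivisionError (tab_size = 0 with a tab in text[:curpos]).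


-- ===== PORT A =====
def get_horizontal_cursor_position (text : String) (curpos : Int) (tab_size : Int) : Int :=
  let ptext := PySem.List.slice text.toList (some 0) (some curpos)   -- text[0:curpos]
  ptext.foldl
    (fun x c => if c = '\t' then x + (tab_size - PySem.Int.mod x tab_size) else x + 1) 0

-- ===== PORT B =====
-- exact port of Python str.split("\t") on a list of characters (non-empty separator keeps empty runs)
def pvSplitTab : List Char → List (List Char)
  | [] => [[]]
  | c :: r =>
    if c = '\t' then [] :: pvSplitTab r
    else
      match pvSplitTab r with
      | p :: ps => (c :: p) :: ps
      | [] => [[c]]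

def get_horizontal_cursor_position_alt (text : String) (curpos : Int) (tab_size : Int) : Int :=
  match pvSplitTab (PySem.List.slice text.toList (some 0) (some curpos)) with
  | [] => 0   -- unreachable: split always returns at least one part
  | p :: rest =>
    rest.foldl
      (fun x part => x + (tab_size - PySem.Int.mod x tab_size) + (part.length : Int))
      (p.length : Int)

-- ===== PRECONDITION & SPEC =====
-- Pre_ excludes only the inputs where Python A raises ZeroDivisionError: a tab in text[:curpos] with tab_size = 0.
def Pre_get_horizontal_cursor_position (text : String) (curpos : Int) (tab_size : Int) : Prop :=
  '\t' ∈ PySem.List.slice text.toList (some 0) (some curpos) → tab_size ≠ 0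
instance (text : String) (curpos : Int) (tab_size : Int) : Decidable (Pre_get_horizontal_cursor_position text curpos tab_size) := by unfold Pre_get_horizontal_cursor_position; infer_instance

def pvWitness_get_horizontal_cursor_position : String × Int × Int := ("a\tbc", 4, 4)

def Spec_get_horizontal_cursor_position (text : String) (curpos : Int) (tab_size : Int) (out : Int) : Prop := out = get_horizontal_cursor_position_alt text curpos tab_size
instance (text : String) (curpos : Int) (tab_size : Int) (out : Int) : Decidable (Spec_get_horizontal_cursor_position text curpos tab_size out) := by unfold Spec_get_horizontal_cursor_position; infer_instance

-- ===== CLAIM (what is proved, stated in full; the proofs are below) =====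
def Claim_equal_get_horizontal_cursor_position : Prop := ∀ (text : String) (curpos : Int) (tab_size : Int), Dom_get_horizontal_cursor_position text curpos tab_size → Pre_get_horizontal_cursor_position text curpos tab_size → Spec_get_horizontal_cursor_position text curpos tab_size (get_horizontal_cursor_position text curpos tab_size)

-- ===== LEMMAS AND PROOFS =====

theorem pvSplitTab_ne_nil (l : List Char) : pvSplitTab l ≠ [] := by
  induction l with
  | nil => simp [pvSplitTab]
  | cons c r ih =>
    simp only [pvSplitTab]
    split
    · simp
    · cases h : pvSplitTab r with
      | nil => simp
      | cons p ps => simp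

-- the loop invariant: A's character fold started at x equals B's segment fold over the split of l
theorem pv_key (ts : Int) (l : List Char) : ∀ (x : Int) (p : List Char) (ps : List (List Char)),
    pvSplitTab l = p :: ps →
    l.foldl (fun x c => if c = '\t' then x + (ts - PySem.Int.mod x ts) else x + 1) x
      = ps.foldl (fun x part => x + (ts - PySem.Int.mod x ts) + (part.length : Int)) (x + (p.length : Int)) := by
  induction l with
  | nil =>
    intro x p ps h
    simp [pvSplitTab] at h
    obtain ⟨hp, hps⟩ := h
    subst hp; subst hps
    simp
  | cons c r ih =>
    intro x p ps h
    by_cases hc : c = '\t'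
    · subst hc
      simp only [pvSplitTab, reduceIte] at h
      injection h with h1 h2
      subst h1
      subst h2
      cases hq : pvSplitTab r with
      | nil => exact absurd hq (pvSplitTab_ne_nil r)
      | cons q qs =>
        simp only [List.foldl_cons, List.length_nil, Nat.cast_zero, add_zero, reduceIte]
        exact ih (x + (ts - PySem.Int.mod x ts)) q qs hq
    · simp only [pvSplitTab, if_neg hc] at h
      cases hq : pvSplitTab r with
      | nil => exact absurd hq (pvSplitTab_ne_nil r)
      | cons q qs =>
        rw [hq] at h
        injection h with h1 h2
        subst h1
        subst h2
        simp only [List.foldl_cons, if_neg hc, List.length_cons]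
        rw [ih (x + 1) q qs hq]
        congr 1
        push_cast
        ring

-- ===== VERDICT (by name: the statement is the Claim_ definition above) =====
theorem get_horizontal_cursor_position_spec : Claim_equal_get_horizontal_cursor_position := by
  intro text curpos tab_size _ _
  unfold Spec_get_horizontal_cursor_position get_horizontal_cursor_position get_horizontal_cursor_position_alt
  cases h : pvSplitTab (PySem.List.slice text.toList (some 0) (some curpos)) with
  | nil => exact absurd h (pvSplitTab_ne_nil _)
  | cons p ps =>
    have := pv_key tab_size (PySem.List.slice text.toList (some 0) (some curpos)) 0 p ps h
    simpa using this
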